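-- pv_equiv track=rewrite | github.com/pabhd3/Daugherty | Coding-Challenges/03-Feb-16-2018/substitutionCipher.py | substitutionEncryption
-- ===== SOURCE A (Python) =====
-- def substitutionEncryption(keyword, plaintext):
--     # Base alphabet used to make our key
--     ALPHABET = "ABCDEFGHIJKLMNOPQRSTUVWXYZ"
--     # Key used to encrypt the plaintext
--     KEY = keyword.upper()
--
--     # Create the encryption key using the key word
--     # For each letter in the normal alphabet
--     for letter in ALPHABET:
--         # If it wasn't in the keyword
--         if(letter not in KEY):
--             # Add it to the key
--             KEY += letter
--
--     ciphertext = ""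
--
--     # For each character in the plaintext message
--     for letter in plaintext:
--         # Check if it a letter
--         if letter.isalpha():
--             # If so, get its index from the original alphabet
--             index = ALPHABET.find(letter.upper())
--             # Add its substituted letter using the index and
--             #     the key we generated
--             ciphertext += KEY[index]
--     # We need to format the ciphertext
--     count = 0
--     ciphertextFormatted = ""
--     # For each letter in the cipher text
--     for letter in ciphertext:
--         # We can only have 5 characters at a time
--         if(count % 5 == 0 and count != 0):
--             ciphertextFormatted += " "
--         # And we can only have 5 sets of 5 characters on a line
--         if(count % 25 == 0 and count != 0):
--             ciphertextFormatted += "\n"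
--         # And a block can only have 250 characters in it
--         if(count % 250 == 0 and count != 0):
--             ciphertextFormatted += "\n"
--         # Add the letter
--         ciphertextFormatted += letter
--         # And increase the count
--         count += 1
--     # And we're done
--     return ciphertextFormatted
-- ===== SOURCE B (Python) =====
-- def substitutionEncryption(keyword, plaintext):
--     # Simpler decomposition: comprehensions for the key and the substituted
--     # letters, then assembly over 5-character groups instead of a per-character
--     # counter with mod tests.
--     ALPHABET = "ABCDEFGHIJKLMNOPQRSTUVWXYZ"
--     up = keyword.upper()
--     key = up + "".join(c for c in ALPHABET if c not in up)
--     letters = [key[ALPHABET.find(c.upper())] for c in plaintext if c.isalpha()]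
--     groups = [letters[i:i + 5] for i in range(0, len(letters), 5)]
--     out = []
--     for g, grp in enumerate(groups):
--         if g >= 1:
--             out.append(" ")
--             if g % 5 == 0:
--                 out.append("\n")
--             if g % 50 == 0:
--                 out.append("\n")
--         out.extend(grp)
--     return "".join(out)
-- ===== Notes on version B (the rewrite author's own statement) =====
-- stated objective: simpler
-- what changed: B replaces A's three per-character accumulator loops (string-growing key loop, ciphertext loop, and a counter with %5/%25/%250 tests per character) by a filter-based key comprehension, a map over the filtered plaintext, and assembly over 5-character groups where separators are decided once per group index.
import Mathlib
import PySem

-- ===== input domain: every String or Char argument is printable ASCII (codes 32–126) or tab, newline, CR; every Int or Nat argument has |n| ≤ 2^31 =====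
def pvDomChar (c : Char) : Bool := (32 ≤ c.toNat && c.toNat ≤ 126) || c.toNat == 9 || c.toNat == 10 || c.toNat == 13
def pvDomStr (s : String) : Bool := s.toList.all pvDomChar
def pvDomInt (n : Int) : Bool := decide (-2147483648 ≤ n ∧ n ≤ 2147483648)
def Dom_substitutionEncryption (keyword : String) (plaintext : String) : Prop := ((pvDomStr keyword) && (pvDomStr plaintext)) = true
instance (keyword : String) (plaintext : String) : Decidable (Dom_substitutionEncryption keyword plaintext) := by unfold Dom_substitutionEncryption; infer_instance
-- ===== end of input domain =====

-- B re-decomposes A: comprehension-built key, map over the filtered plaintext, and output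
-- assembled per 5-character group (separator decided once per group index) instead of A's
-- per-character counter with %5/%25/%250 tests; same output, same cost.

-- ===== PORT A =====
-- A's formatting loop body ('for letter in ciphertext: ...'), named so the proofs can speak about it
def astep (st : Int × List Char) (letter : Char) : Int × List Char :=
  let acc1 := if st.1 % 5 == 0 && st.1 != 0 then st.2 ++ [' '] else st.2
  let acc2 := if st.1 % 25 == 0 && st.1 != 0 then acc1 ++ ['\n'] else acc1
  let acc3 := if st.1 % 250 == 0 && st.1 != 0 then acc2 ++ ['\n'] else acc2
  (st.1 + 1, acc3 ++ [letter])

-- The `.getD 'A'` on pyGet? is unreachable: the key always has ≥ 1 character (it contains the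
-- alphabet), so Python's KEY[index] (index ≥ -1) never raises; pyGet? handles index -1 as Python does.
def substitutionEncryption (keyword : String) (plaintext : String) : String :=
  let alphabet := "ABCDEFGHIJKLMNOPQRSTUVWXYZ".toList
  let key := alphabet.foldl
    (fun KEY letter => if PySem.Chars.isIn [letter] KEY then KEY else KEY ++ [letter])
    (PySem.Chars.upper keyword.toList)
  let ciphertext := plaintext.toList.foldl
    (fun ct letter =>
      if PySem.Chars.isalpha letter then
        ct ++ [(PySem.List.pyGet? key (PySem.Chars.find alphabet [PySem.Chars.upperChar letter])).getD 'A']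
      else ct) ([] : List Char)
  let fmt := ciphertext.foldl astep ((0 : Int), ([] : List Char))
  String.mk fmt.2

-- ===== PORT B =====
-- groups = [letters[i:i+5] for i in range(0, len(letters), 5)]
def pvChunks5 (ls : List Char) : List (List Char) :=
  if ls.isEmpty then [] else ls.take 5 :: pvChunks5 (ls.drop 5)
termination_by ls.length
decreasing_by
  cases ls with
  | nil => simp_all
  | cons a t => simp [List.length_drop]

-- B's per-group assembly step (the body of 'for g, grp in enumerate(groups): ...')
def bstepB (acc : List Char) (gp : Int × List Char) : List Char :=
  let acc' :=
    if 1 ≤ gp.1 then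
      let s1 := acc ++ [' ']
      let s2 := if gp.1 % 5 == 0 then s1 ++ ['\n'] else s1
      if gp.1 % 50 == 0 then s2 ++ ['\n'] else s2
    else acc
  acc' ++ gp.2

def substitutionEncryption_alt (keyword : String) (plaintext : String) : String :=
  let alphabet := "ABCDEFGHIJKLMNOPQRSTUVWXYZ".toList
  let up := PySem.Chars.upper keyword.toList
  let key := up ++ alphabet.filter (fun c => !(PySem.Chars.isIn [c] up))
  let letters := (plaintext.toList.filter (fun c => PySem.Chars.isalpha c)).map
    (fun c => (PySem.List.pyGet? key (PySem.Chars.find alphabet [PySem.Chars.upperChar c])).getD 'A')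
  let out := (PySem.List.enumerate (pvChunks5 letters)).foldl bstepB ([] : List Char)
  String.mk out

-- ===== PRECONDITION & SPEC =====
def Spec_substitutionEncryption (keyword : String) (plaintext : String) (out : String) : Prop := out = substitutionEncryption_alt keyword plaintext
instance (keyword : String) (plaintext : String) (out : String) : Decidable (Spec_substitutionEncryption keyword plaintext out) := by unfold Spec_substitutionEncryption; infer_instance

-- ===== CLAIM (what is proved, stated in full; the proofs are below) =====
def Claim_equal_substitutionEncryption : Prop := ∀ (keyword : String) (plaintext : String), Dom_substitutionEncryption keyword plaintext → Spec_substitutionEncryption keyword plaintext (substitutionEncryption keyword plaintext)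

-- ===== LEMMAS AND PROOFS =====

-- single-character membership test is list membership
theorem isIn_singleton (d : Char) (s : List Char) : PySem.Chars.isIn [d] s = s.contains d := by
  cases hb : s.contains d with
  | false =>
    rw [PySem.Chars.isIn_eq_false_iff]
    intro hinf
    have hd : d ∈ s := hinf.subset (by simp)
    simp [List.contains_eq_mem, hd] at hb
  | true =>
    have hd : d ∈ s := by simpa [List.contains_eq_mem] using hb
    obtain ⟨l, r, rfl⟩ := List.append_of_mem hd
    rw [show PySem.Chars.isIn [d] (l ++ d :: r) = true ↔ [d] <:+: (l ++ d :: r) from PySem.Chars.isIn_iff_infix _ _]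
    exact ⟨l, r, by simp⟩

-- A's key-building loop equals B's filter comprehension
theorem key_fold_eq (ls : List Char) (h : ls.Nodup) : ∀ (up : List Char),
    ls.foldl (fun KEY letter => if PySem.Chars.isIn [letter] KEY then KEY else KEY ++ [letter]) up
      = up ++ ls.filter (fun c => !(PySem.Chars.isIn [c] up)) := by
  induction ls with
  | nil => intro up; simp
  | cons c rest ih =>
    intro up
    have hrest := (List.nodup_cons.mp h).2
    have hc : c ∉ rest := (List.nodup_cons.mp h).1
    simp only [List.foldl_cons, List.filter_cons]
    cases hin : PySem.Chars.isIn [c] up with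
    | true => simp [hin, ih hrest up]
    | false =>
      have : rest.filter (fun d => !(PySem.Chars.isIn [d] (up ++ [c])))
           = rest.filter (fun d => !(PySem.Chars.isIn [d] up)) := by
        apply List.filter_congr
        intro d hd
        have hdc : d ≠ c := fun he => hc (he ▸ hd)
        simp [isIn_singleton, hdc]
      simp [hin, ih hrest (up ++ [c]), this]

-- separator before group g (empty for group 0)
def sepN (g : Nat) : List Char :=
  if g = 0 then [] else
    ' ' :: ((if g % 5 = 0 then ['\n'] else []) ++ (if g % 50 = 0 then ['\n'] else []))

-- canonical grouped rendering both formatting loops are reduced to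
def renderFrom (g : Nat) (ls : List Char) : List Char :=
  if ls.isEmpty then [] else sepN g ++ ls.take 5 ++ renderFrom (g + 1) (ls.drop 5)
termination_by ls.length
decreasing_by
  cases ls with
  | nil => simp_all
  | cons a t => simp [List.length_drop]

theorem renderFrom_nil (g : Nat) : renderFrom g [] = [] := by
  rw [renderFrom]; simp

theorem renderFrom_cons (g : Nat) (ls : List Char) (h : ls ≠ []) :
    renderFrom g ls = sepN g ++ ls.take 5 ++ renderFrom (g + 1) (ls.drop 5) := by
  rw [renderFrom]; simp [h]


theorem astep_mid (n : Int) (h : n % 5 ≠ 0) (acc : List Char) (c : Char) :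
    astep (n, acc) c = (n + 1, acc ++ [c]) := by
  have h25 : ¬ n % 25 = 0 := by omega
  have h250 : ¬ n % 250 = 0 := by omega
  simp [astep, h, h25, h250]

theorem astep_start (g : Nat) (acc : List Char) (c : Char) :
    astep ((5 * g : Int), acc) c = ((5 * g : Int) + 1, acc ++ sepN g ++ [c]) := by
  by_cases hg : g = 0
  · subst hg; simp [astep, sepN]
  · have h5 : (5 * (g : Int)) % 5 = 0 := by omega
    have hne : (5 * (g : Int)) ≠ 0 := by omega
    have h25 : (5 * (g : Int)) % 25 = 0 ↔ g % 5 = 0 := by omega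
    have h250 : (5 * (g : Int)) % 250 = 0 ↔ g % 50 = 0 := by omega
    simp only [astep, sepN, hg]
    by_cases hA : g % 5 = 0 <;> by_cases hB : g % 50 = 0 <;>
      simp [h5, hne, h25, h250, hA, hB]

theorem foldA : ∀ (ls : List Char) (g : Nat) (acc : List Char),
    ls.foldl astep ((5 * g : Int), acc) = ((5 * g + ls.length : Int), acc ++ renderFrom g ls)
  | [], g, acc => by simp [renderFrom_nil]
  | [a], g, acc => by
    rw [renderFrom_cons g _ (by simp)]
    simp only [List.foldl_cons, List.foldl_nil, astep_start g acc a]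
    simp only [Prod.mk.injEq]
    exact ⟨by simp <;> omega, by simp [renderFrom_nil]⟩
  | [a, b], g, acc => by
    rw [renderFrom_cons g _ (by simp)]
    simp only [List.foldl_cons, List.foldl_nil, astep_start g acc a,
      astep_mid (5 * (g : Int) + 1) (by omega)]
    simp only [Prod.mk.injEq]
    exact ⟨by simp <;> omega, by simp [renderFrom_nil]⟩
  | [a, b, c], g, acc => by
    rw [renderFrom_cons g _ (by simp)]
    simp only [List.foldl_cons, List.foldl_nil, astep_start g acc a,
      astep_mid (5 * (g : Int) + 1) (by omega),
      astep_mid (5 * (g : Int) + 1 + 1) (by omega)]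
    simp only [Prod.mk.injEq]
    exact ⟨by simp <;> omega, by simp [renderFrom_nil]⟩
  | [a, b, c, d], g, acc => by
    rw [renderFrom_cons g _ (by simp)]
    simp only [List.foldl_cons, List.foldl_nil, astep_start g acc a,
      astep_mid (5 * (g : Int) + 1) (by omega),
      astep_mid (5 * (g : Int) + 1 + 1) (by omega),
      astep_mid (5 * (g : Int) + 1 + 1 + 1) (by omega)]
    simp only [Prod.mk.injEq]
    exact ⟨by simp <;> omega, by simp [renderFrom_nil]⟩
  | a :: b :: c :: d :: e :: rest, g, acc => by
    rw [renderFrom_cons g _ (by simp)]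
    have hrec := foldA rest (g + 1) (acc ++ sepN g ++ [a, b, c, d, e])
    simp only [List.foldl_cons, astep_start g acc a,
      astep_mid (5 * (g : Int) + 1) (by omega),
      astep_mid (5 * (g : Int) + 1 + 1) (by omega),
      astep_mid (5 * (g : Int) + 1 + 1 + 1) (by omega),
      astep_mid (5 * (g : Int) + 1 + 1 + 1 + 1) (by omega)]
    have h5 : (5 * (g : Int)) + 1 + 1 + 1 + 1 + 1 = (5 * ((g + 1 : Nat)) : Int) := by
      push_cast; ring
    have hacc : acc ++ sepN g ++ [a] ++ [b] ++ [c] ++ [d] ++ [e]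
        = acc ++ sepN g ++ [a, b, c, d, e] := by simp
    rw [h5, hacc, hrec]
    simp only [Prod.mk.injEq]
    exact ⟨by simp <;> omega, by simp⟩
  termination_by ls => ls.length

theorem bstep_eval (g : Nat) (acc chunk : List Char) :
    bstepB acc ((g : Int), chunk) = acc ++ sepN g ++ chunk := by
  by_cases hg : g = 0
  · subst hg; simp [bstepB, sepN]
  · have h1 : (1 : Int) ≤ (g : Int) := by omega
    have h5 : (g : Int) % 5 = 0 ↔ g % 5 = 0 := by omega
    have h50 : (g : Int) % 50 = 0 ↔ g % 50 = 0 := by omega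
    simp only [bstepB, sepN, hg]
    by_cases hA : g % 5 = 0 <;> by_cases hB : g % 50 = 0 <;>
      simp [h1, h5, h50, hA, hB]

theorem foldB : ∀ (ls : List Char) (g : Nat) (acc : List Char),
    (PySem.List.enumerate (pvChunks5 ls) (g : Int)).foldl bstepB acc = acc ++ renderFrom g ls
  | [], g, acc => by
    rw [pvChunks5, renderFrom]
    simp
  | (a :: t), g, acc => by
    rw [pvChunks5, renderFrom_cons g _ (by simp)]
    have hrec := foldB ((a :: t).drop 5) (g + 1) (acc ++ sepN g ++ (a :: t).take 5)
    simp only [List.isEmpty_cons, Bool.false_eq_true, if_false, PySem.List.enumerate_cons,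
      List.foldl_cons]
    rw [bstep_eval g acc ((a :: t).take 5)]
    have hcast : (g : Int) + 1 = ((g + 1 : Nat) : Int) := by push_cast; ring
    rw [hcast, hrec]
    simp
  termination_by ls => ls.length
  decreasing_by simp [List.length_drop]

theorem alphabet_nodup : ("ABCDEFGHIJKLMNOPQRSTUVWXYZ".toList).Nodup := by decide

-- ===== VERDICT (by name: the statement is the Claim_ definition above) =====
theorem substitutionEncryption_spec : Claim_equal_substitutionEncryption := by
  intro keyword plaintext _
  unfold Spec_substitutionEncryption substitutionEncryption substitutionEncryption_alt
  simp only [key_fold_eq _ alphabet_nodup, PySem.List.foldl_append_if, List.nil_append]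
  have hA := foldA ((plaintext.toList.filter PySem.Chars.isalpha).map
    (fun c => (PySem.List.pyGet? (PySem.Chars.upper keyword.toList ++
        List.filter (fun c => !PySem.Chars.isIn [c] (PySem.Chars.upper keyword.toList))
          "ABCDEFGHIJKLMNOPQRSTUVWXYZ".toList)
      (PySem.Chars.find "ABCDEFGHIJKLMNOPQRSTUVWXYZ".toList [PySem.Chars.upperChar c])).getD 'A'))
    0 []
  have hB := foldB ((plaintext.toList.filter PySem.Chars.isalpha).map
    (fun c => (PySem.List.pyGet? (PySem.Chars.upper keyword.toList ++
        List.filter (fun c => !PySem.Chars.isIn [c] (PySem.Chars.upper keyword.toList))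
          "ABCDEFGHIJKLMNOPQRSTUVWXYZ".toList)
      (PySem.Chars.find "ABCDEFGHIJKLMNOPQRSTUVWXYZ".toList [PySem.Chars.upperChar c])).getD 'A'))
    0 []
  simp only [Nat.cast_zero, Nat.cast_ofNat, mul_zero, List.nil_append] at hA hB
  rw [hA, hB]
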